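-- pv_equiv track=rewrite | github.com/psr/Advent-of-Code | 2025/day02.py | apply_pattern
-- ===== SOURCE A (Python) =====
-- def apply_pattern(pattern_length, n_digits, pattern):
--     multiply_by = 10**pattern_length
--     n = pattern
--     n_length = pattern_length
--     while n_length < n_digits:
--         n *= multiply_by
--         n += pattern
--         n_length += pattern_length
--     return n
-- ===== SOURCE B (Python) =====
-- def _geom(M, c):
--     # returns (1 + M + ... + M**(c-1), M**c) by binary doubling
--     if c == 0:
--         return 0, 1
--     s, p = _geom(M, c // 2)
--     s, p = s * (p + 1), p * p
--     if c % 2: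
--         s, p = M * s + 1, p * M
--     return s, p
--
-- def apply_pattern(pattern_length, n_digits, pattern):
--     copies = max(1, -(-n_digits // pattern_length))
--     M = 10 ** pattern_length
--     s, p = _geom(M, copies // 2)
--     s = s * (p + 1)
--     if copies % 2:
--         s = M * s + 1
--     return pattern * s
-- ===== Notes on version B (the rewrite author's own statement) =====
-- stated objective: alternative
-- what changed: Replaces A's one-copy-at-a-time append loop with a closed-form copy count (copies = max(1, ceil(n_digits/pattern_length))) and a binary-doubling computation of the geometric sum 1 + M + ... + M^(copies-1) (M = 10**pattern_length), multiplied by pattern once; it trades the linear repetition loop for O(log copies) doubling steps.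
-- outside the precondition, e.g. on apply_pattern(0, 0, 5): A returns 5, B raises ZeroDivisionError; on apply_pattern(-1, -2, 7): A returns 7, B returns 7.700000000000001
import Mathlib
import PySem

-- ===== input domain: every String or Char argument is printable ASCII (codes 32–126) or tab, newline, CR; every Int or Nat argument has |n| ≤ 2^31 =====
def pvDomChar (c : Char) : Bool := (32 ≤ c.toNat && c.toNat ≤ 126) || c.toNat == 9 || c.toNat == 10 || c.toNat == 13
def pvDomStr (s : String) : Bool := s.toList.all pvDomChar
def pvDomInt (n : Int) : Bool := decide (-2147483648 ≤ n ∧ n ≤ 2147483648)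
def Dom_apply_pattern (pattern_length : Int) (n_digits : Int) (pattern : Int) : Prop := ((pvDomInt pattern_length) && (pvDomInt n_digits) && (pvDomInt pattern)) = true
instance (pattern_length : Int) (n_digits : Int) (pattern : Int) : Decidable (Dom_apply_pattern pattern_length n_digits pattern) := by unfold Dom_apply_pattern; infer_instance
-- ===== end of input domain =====

-- B replaces A's repeat-and-append loop with a ceil-division copy count and a binary-doubling geometric sum (objective: alternative).


-- ===== PORT A =====
-- A's while loop: n ← n*10^pl + pattern, n_length ← n_length + pl, while n_length < n_digits.
-- (The '0 < pl' conjunct in the guard only makes the recursion total: for pl ≤ 0 the Python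
-- loop diverges whenever it is entered, and those inputs are outside Pre_.)
def applyLoopA (pl nd pattern : Int) (n nlen : Int) : Int :=
  if h : nlen < nd ∧ 0 < pl then
    applyLoopA pl nd pattern (n * 10 ^ pl.toNat + pattern) (nlen + pl)
  else n
termination_by (nd - nlen).toNat
decreasing_by omega

def apply_pattern (pattern_length : Int) (n_digits : Int) (pattern : Int) : Int :=
  applyLoopA pattern_length n_digits pattern pattern pattern_length

-- ===== PORT B =====
-- _geom(M, c) = (1 + M + … + M^(c-1), M^c) by binary doubling, as in Source B
def geomPow (M : Int) (c : Nat) : Int × Int :=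
  if c = 0 then (0, 1)
  else
    let sp := geomPow M (c / 2)
    let s := sp.1 * (sp.2 + 1)
    let p := sp.2 * sp.2
    if c % 2 = 1 then (M * s + 1, p * M) else (s, p)
termination_by c
decreasing_by omega

-- copies = max(1, -(-n_digits // pattern_length)); M = 10**pattern_length;
-- s, p = _geom(M, copies // 2); s = s*(p+1); if copies odd: s = M*s + 1; return pattern * s.
-- ('.toNat' on the exponent/count is exact inside Pre_: there pattern_length ≥ 1 and copies ≥ 1.)
def apply_pattern_alt (pattern_length : Int) (n_digits : Int) (pattern : Int) : Int :=
  let copies : Int := max 1 (-(PySem.Int.floordiv (-n_digits) pattern_length))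
  let M : Int := 10 ^ pattern_length.toNat
  let sp := geomPow M (copies.toNat / 2)
  let s := sp.1 * (sp.2 + 1)
  let s' := if copies.toNat % 2 = 1 then M * s + 1 else s
  pattern * s'

-- ===== PRECONDITION & SPEC =====
-- Pre_ excludes pattern_length ≤ 0: there the Python A diverges whenever n_digits > pattern_length,
-- and on the remaining inputs A returns the bare pattern while B raises ZeroDivisionError
-- (pattern_length = 0) or returns a float (10**pattern_length is not an integer) — no int to match.
def Pre_apply_pattern (pattern_length : Int) (n_digits : Int) (pattern : Int) : Prop :=
  1 ≤ pattern_length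
instance (pattern_length : Int) (n_digits : Int) (pattern : Int) : Decidable (Pre_apply_pattern pattern_length n_digits pattern) := by unfold Pre_apply_pattern; infer_instance

def pvWitness_apply_pattern : Int × Int × Int := (2, 7, 31)

def Spec_apply_pattern (pattern_length : Int) (n_digits : Int) (pattern : Int) (out : Int) : Prop := out = apply_pattern_alt pattern_length n_digits pattern
instance (pattern_length : Int) (n_digits : Int) (pattern : Int) (out : Int) : Decidable (Spec_apply_pattern pattern_length n_digits pattern out) := by unfold Spec_apply_pattern; infer_instance

-- ===== CLAIM (what is proved, stated in full; the proofs are below) =====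
def Claim_equal_apply_pattern : Prop := ∀ (pattern_length : Int) (n_digits : Int) (pattern : Int), Dom_apply_pattern pattern_length n_digits pattern → Pre_apply_pattern pattern_length n_digits pattern → Spec_apply_pattern pattern_length n_digits pattern (apply_pattern pattern_length n_digits pattern)

-- ===== LEMMAS AND PROOFS =====

-- the number of iterations A's loop performs from running length nlen
def applyIters (pl nd nlen : Int) : Nat :=
  if h : nlen < nd ∧ 0 < pl then applyIters pl nd (nlen + pl) + 1 else 0
termination_by (nd - nlen).toNat
decreasing_by omega

-- geometric sum 1 + M + … + M^(k-1)
def gsum (M : Int) : Nat → Int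
  | 0 => 0
  | k + 1 => gsum M k + M ^ k

theorem loopA_eq_gsum (pl nd p : Int) (hpl : 0 < pl) :
    ∀ n nlen, applyLoopA pl nd p n nlen
      = n * (10 ^ pl.toNat) ^ applyIters pl nd nlen + p * gsum (10 ^ pl.toNat) (applyIters pl nd nlen) := by
  intro n nlen
  induction n, nlen using applyLoopA.induct pl nd p with
  | case1 n nlen h ih =>
    rw [applyLoopA, applyIters, dif_pos h, dif_pos h, ih]
    simp only [gsum, pow_succ]
    ring
  | case2 n nlen h =>
    rw [applyLoopA, applyIters, dif_neg h, dif_neg h]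
    simp [gsum]

theorem iters_bounds (pl nd : Int) (hpl : 0 < pl) :
    ∀ nlen, nd - nlen ≤ pl * applyIters pl nd nlen ∧
      (applyIters pl nd nlen = 0 ∨ pl * ((applyIters pl nd nlen : Int) - 1) < nd - nlen) := by
  intro nlen
  induction nlen using applyIters.induct pl nd with
  | case1 nlen h ih =>
    rw [applyIters, dif_pos h]
    push_cast
    constructor
    · have := ih.1; nlinarith
    · right
      rcases ih.2 with h0 | hlt
      · rw [h0]; push_cast; nlinarith [h.1, h.2]
      · nlinarith
  | case2 nlen h =>
    rw [applyIters, dif_neg h]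
    refine ⟨?_, Or.inl rfl⟩
    simp only [Nat.cast_zero, mul_zero]
    omega

-- the iteration count is determined by its bounds
theorem iters_unique (pl x : Int) (hpl : 0 < pl) (c1 c2 : Nat)
    (h1 : x ≤ pl * c1 ∧ (c1 = 0 ∨ pl * ((c1 : Int) - 1) < x))
    (h2 : x ≤ pl * c2 ∧ (c2 = 0 ∨ pl * ((c2 : Int) - 1) < x)) : c1 = c2 := by
  by_contra hne
  rcases Nat.lt_or_ge c1 c2 with hlt | hge
  · rcases h2.2 with h0 | h
    · omega
    · have : pl * (c1 : Int) ≤ pl * ((c2 : Int) - 1) := by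
        apply mul_le_mul_of_nonneg_left _ (le_of_lt hpl); push_cast; omega
      have := h1.1; omega
  · have hlt : c2 < c1 := by omega
    rcases h1.2 with h0 | h
    · omega
    · have : pl * (c2 : Int) ≤ pl * ((c1 : Int) - 1) := by
        apply mul_le_mul_of_nonneg_left _ (le_of_lt hpl); push_cast; omega
      have := h2.1; omega

-- B's copies count = loop iterations + 1
theorem copies_eq (pl nd : Int) (hpl : 0 < pl) :
    (max 1 (-(PySem.Int.floordiv (-nd) pl))).toNat = applyIters pl nd pl + 1 := by
  set q : Int := -(PySem.Int.floordiv (-nd) pl) with hq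
  have hqiff := (PySem.Int.neg_floordiv_neg_eq_iff_of_pos (a := nd) (b := pl) (q := q) hpl).mp rfl
  -- hqiff : (q - 1) * pl < nd ∧ nd ≤ q * pl
  set c := applyIters pl nd pl with hc
  have hb := iters_bounds pl nd hpl pl
  have hcopies : (1 : Int) ≤ max 1 q := le_max_left _ _
  have key : (max 1 q).toNat = c + 1 := by
    have h2 : nd - pl ≤ pl * ((max 1 q).toNat - 1 : Nat) ∧
        (((max 1 q).toNat - 1 : Nat) = 0 ∨ pl * ((((max 1 q).toNat - 1 : Nat) : Int) - 1) < nd - pl) := by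
      rcases le_or_gt q 1 with hle | hgt
      · have hm : max 1 q = 1 := by omega
        rw [hm]
        refine ⟨?_, Or.inl rfl⟩
        -- nd ≤ pl : from nd ≤ q*pl ≤ 1*pl
        have h1 : q * pl ≤ 1 * pl :=
          mul_le_mul_of_nonneg_right hle (le_of_lt hpl)
        have h2 : (((1 : Int).toNat - 1 : Nat) : Int) = 0 := rfl
        rw [h2, mul_zero]
        omega
      · have hm : max 1 q = q := by omega
        rw [hm]
        have hq1 : ((q.toNat - 1 : Nat) : Int) = q - 1 := by omega
        constructor
        · rw [hq1]; nlinarith [hqiff.2]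
        · right; rw [hq1]; nlinarith [hqiff.1]
    have := iters_unique pl (nd - pl) hpl ((max 1 q).toNat - 1) c h2 hb
    omega
  exact key

theorem gsum_succ' (M : Int) (k : Nat) : gsum M (k + 1) = M * gsum M k + 1 := by
  induction k with
  | zero => simp [gsum]
  | succ n ih => simp only [gsum] at ih ⊢; linear_combination ih

theorem gsum_add (M : Int) (a b : Nat) : gsum M (a + b) = gsum M a + M ^ a * gsum M b := by
  induction b with
  | zero => simp [gsum]
  | succ n ih =>
    have h : a + (n + 1) = (a + n) + 1 := by omega
    rw [h]
    simp only [gsum, ih, pow_add]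
    ring

theorem geomPow_spec (M : Int) (c : Nat) : geomPow M c = (gsum M c, M ^ c) := by
  induction c using Nat.strong_induction_on with
  | _ c ih =>
    rw [geomPow]
    by_cases h0 : c = 0
    · simp [h0, gsum]
    · rw [if_neg h0, ih (c / 2) (Nat.div_lt_self (by omega) (by omega))]
      set k := c / 2 with hk
      by_cases hpar : c % 2 = 1
      · have hc : c = k + k + 1 := by omega
        rw [if_pos hpar, hc, gsum_succ', gsum_add]
        refine Prod.ext ?_ ?_ <;> simp only [pow_add, pow_succ] <;> ring
      · have hc : c = k + k := by omega
        rw [if_neg hpar, hc, gsum_add]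
        refine Prod.ext ?_ ?_ <;> simp only [pow_add] <;> ring

-- combining step of Source B's top level: s*(p+1) then the odd correction yields gsum
theorem gsum_combine (M : Int) (n : Nat) :
    (if n % 2 = 1 then M * (gsum M (n / 2) * (M ^ (n / 2) + 1)) + 1
     else gsum M (n / 2) * (M ^ (n / 2) + 1)) = gsum M n := by
  by_cases hpar : n % 2 = 1
  · have hc : n = (n / 2) + (n / 2) + 1 := by omega
    rw [if_pos hpar]
    conv_rhs => rw [hc]
    rw [gsum_succ', gsum_add]
    ring
  · have hc : n = (n / 2) + (n / 2) := by omega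
    rw [if_neg hpar]
    conv_rhs => rw [hc]
    rw [gsum_add]
    ring

theorem apply_pattern_spec : Claim_equal_apply_pattern := by
  intro pl nd p _ hpre
  unfold Spec_apply_pattern apply_pattern apply_pattern_alt
  have hpl : 0 < pl := hpre
  set M : Int := 10 ^ pl.toNat with hM
  have hM1 : 1 < M := by
    have : (10 : Int) ^ 1 ≤ 10 ^ pl.toNat := by
      apply pow_le_pow_right₀ (by norm_num)
      omega
    simpa using lt_of_lt_of_le (by norm_num) this
  show _ = p * (if (max 1 (-(PySem.Int.floordiv (-nd) pl))).toNat % 2 = 1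
      then M * ((geomPow M ((max 1 (-(PySem.Int.floordiv (-nd) pl))).toNat / 2)).1 *
        ((geomPow M ((max 1 (-(PySem.Int.floordiv (-nd) pl))).toNat / 2)).2 + 1)) + 1
      else (geomPow M ((max 1 (-(PySem.Int.floordiv (-nd) pl))).toNat / 2)).1 *
        ((geomPow M ((max 1 (-(PySem.Int.floordiv (-nd) pl))).toNat / 2)).2 + 1))
  rw [loopA_eq_gsum pl nd p hpl]
  set ct := (max 1 (-(PySem.Int.floordiv (-nd) pl))).toNat with hct
  rw [geomPow_spec]
  simp only
  rw [gsum_combine M ct, hct, copies_eq pl nd hpl]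
  set c := applyIters pl nd pl with hc
  simp only [gsum]
  ring
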